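-- pv_equiv track=rewrite | github.com/zjc20030326/Python_Study | Python入门学习/程序/doudizhu.py | is_aircraft_wing
-- ===== SOURCE A (Python) =====
-- def is_continue(cards):
--     # 注意：'2'和大小王不能参与
--     length = len(cards)
--     if 13 in cards or 14 in cards or 15 in cards or len(set(cards)) != length:
--         return False
--     else:
--         for i in range(length - 1):
--             if cards[i] + 1 != cards[i + 1]:
--                 return False
--         else:
--             return True
--
-- def is_aircraft(cards):
--     # 注意：'2'和大小王不能参与
--     # 先判断是否每三张牌均相同，比如333444
--     length = len(cards)
--     cards.sort()
--     for i in range(0, length - 2, 3):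
--         if (
--             (cards[i] != cards[i + 1])
--             or (cards[i] != cards[i + 2])
--             or (cards[i + 1] != cards[i + 2])
--         ):
--             return False
--     else:
--         # 如果每三张牌均相同，去重后检测是否为顺子
--         return is_continue(cards[::3])
--
-- def is_aircraft_wing(cards):
--     # 注意：'2'和大小王不能参与
--     # 先将飞机放到t1中
--     # 再将翅膀放到t2中
--     t1 = []
--     t2 = []
--     for each in cards:
--         if cards.count(each) == 3:
--             t1.append(each)
--         else:
--             t2.append(each)
--
--     # 先判断飞机是否合法
--     # 再判断剩余的牌是否与飞机配对
--     if is_aircraft(t1) and len(t1) / 3 == len(set(t2)):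
--         return True
--     else:
--         return False
-- ===== SOURCE B (Python) =====
-- def is_aircraft_wing(cards):
--     # Count each value once; triples are the distinct values appearing exactly 3 times,
--     # wings are the remaining distinct values.  The planes are consecutive iff
--     # max - min == k - 1 (values are distinct), with 13/14/15 excluded.
--     counts = {}
--     for c in cards:
--         counts[c] = counts.get(c, 0) + 1
--     triples = [v for v, n in counts.items() if n == 3]
--     wings = len(counts) - len(triples)
--     if len(triples) != wings:
--         return False
--     if not triples:
--         return True
--     if any(v in (13, 14, 15) for v in triples):
--         return False
--     return max(triples) - min(triples) == len(triples) - 1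
-- ===== Notes on version B (the rewrite author's own statement) =====
-- stated objective: faster
-- what changed: B builds one counts dict and decides the combo arithmetically - triples are the distinct values counted exactly 3 times, planes are consecutive iff max-min == k-1 - instead of A's expand/sort/slice pipeline (partition by repeated cards.count, sort the triple cards, scan blocks of three, slice every 3rd, pairwise-scan for a straight) with its is_aircraft/is_continue helpers.
import Mathlib
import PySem

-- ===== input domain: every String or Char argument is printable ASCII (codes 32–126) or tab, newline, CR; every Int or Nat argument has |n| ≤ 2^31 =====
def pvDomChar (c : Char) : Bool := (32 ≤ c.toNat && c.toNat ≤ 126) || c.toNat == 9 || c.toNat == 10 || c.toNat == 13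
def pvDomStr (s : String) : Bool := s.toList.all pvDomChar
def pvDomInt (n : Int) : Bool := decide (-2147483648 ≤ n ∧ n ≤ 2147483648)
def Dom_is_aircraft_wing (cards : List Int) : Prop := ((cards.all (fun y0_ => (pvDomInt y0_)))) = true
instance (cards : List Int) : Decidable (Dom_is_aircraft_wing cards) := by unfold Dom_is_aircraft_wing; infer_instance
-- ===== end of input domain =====

-- B replaces A's partition/sort/block-scan/slice/pairwise-scan pipeline by one counting
-- dict and the closed-form test max-min == k-1 on the distinct triple values (faster: one counting pass replaces A's per-element cards.count scans; A returns without mutating its argument).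


-- ===== PORT A =====
-- helper is_continue: the for-loop early-returns False at the first bad pair; List.all
-- returns the same value. cards[i]/cards[i+1] are always in range for i in range(len-1),
-- so the total pyGetD (default never read) is exact there.
def is_continue (cards : List Int) : Bool :=
  let length : Int := cards.length
  if cards.contains 13 || cards.contains 14 || cards.contains 15
      || !((PySem.Set.ofList cards).length == cards.length) then false
  else
    (PySem.List.pyRange 0 (length - 1) 1).all
      (fun i => PySem.List.pyGetD cards i 0 + 1 == PySem.List.pyGetD cards (i + 1) 0)

-- helper is_aircraft: cards.sort() sorts the local list (A only ever passes it a fresh t1,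
-- so no caller-visible mutation); the stepped for-loop early-returns False, = List.all.
-- Indices i, i+1, i+2 are in range for i in range(0, len-2, 3), so pyGetD is exact there.
-- cards[::3] is the step-3 slice: slice? with step 3 is always `some`, .getD [] never read.
def is_aircraft (cards : List Int) : Bool :=
  let length : Int := cards.length
  let sortedC := PySem.List.sorted cards (fun x => x)
  if (PySem.List.pyRange 0 (length - 2) 3).all (fun i =>
      !((!(PySem.List.pyGetD sortedC i 0 == PySem.List.pyGetD sortedC (i + 1) 0))
        || (!(PySem.List.pyGetD sortedC i 0 == PySem.List.pyGetD sortedC (i + 2) 0))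
        || (!(PySem.List.pyGetD sortedC (i + 1) 0 == PySem.List.pyGetD sortedC (i + 2) 0))))
  then is_continue ((PySem.List.slice? sortedC none none 3).getD [])
  else false

-- len(t1)/3 == len(set(t2)) uses float '/'; len(t1) is always a multiple of 3 here and far
-- below 2^53, so the float test is exactly len(t1) == 3*len(set(t2)).
def is_aircraft_wing (cards : List Int) : Bool :=
  let t : List Int × List Int := cards.foldl
    (fun acc each =>
      if PySem.List.count cards each == 3 then (acc.1 ++ [each], acc.2)
      else (acc.1, acc.2 ++ [each]))
    ([], [])
  if is_aircraft t.1 && ((t.1.length : Int) == 3 * ((PySem.Set.ofList t.2).length : Int))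
  then true else false

-- ===== PORT B =====
-- counts[c] = counts.get(c, 0) + 1 loop; triples/wings from the dict's items; max/min over
-- the nonempty triples list (the match's fallthrough is unreachable: triples ≠ [] there).
def is_aircraft_wing_alt (cards : List Int) : Bool :=
  let counts : PySem.Dict Int Int :=
    cards.foldl (fun d c => d.insert c (d.getD c 0 + 1)) PySem.Dict.empty
  let triples : List Int := (counts.items.filter (fun p => p.2 == 3)).map (fun p => p.1)
  let wings : Int := (counts.items.length : Int) - (triples.length : Int)
  if !((triples.length : Int) == wings) then false
  else if triples.isEmpty then true
  else if triples.any (fun v => v == 13 || v == 14 || v == 15) then false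
  else
    match PySem.List.max? triples (fun x => x), PySem.List.min? triples (fun x => x) with
    | some mx, some mn => mx - mn == (triples.length : Int) - 1
    | _, _ => false

-- ===== PRECONDITION & SPEC =====
def Spec_is_aircraft_wing (cards : List Int) (out : Bool) : Prop := out = is_aircraft_wing_alt cards
instance (cards : List Int) (out : Bool) : Decidable (Spec_is_aircraft_wing cards out) := by unfold Spec_is_aircraft_wing; infer_instance

-- ===== CLAIM (what is proved, stated in full; the proofs are below) =====
def Claim_equal_is_aircraft_wing : Prop := ∀ (cards : List Int), Dom_is_aircraft_wing cards → Spec_is_aircraft_wing cards (is_aircraft_wing cards)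

-- ===== LEMMAS AND PROOFS =====

-- the reduced common form both ports are proved equal to
def pvAnswer (cards : List Int) : Bool :=
  let T : List Int := (PySem.Set.ofList cards).filter (fun v => PySem.List.count cards v == 3)
  let D : List Int := PySem.Set.ofList cards
  if !((T.length : Int) == (D.length : Int) - (T.length : Int)) then false
  else if T.isEmpty then true
  else if T.any (fun v => v == 13 || v == 14 || v == 15) then false
  else
    match PySem.List.max? T (fun x => x), PySem.List.min? T (fun x => x) with
    | some mx, some mn => mx - mn == (T.length : Int) - 1
    | _, _ => false


theorem pv_foldl_add_nodup {l acc : List Int} (h : (acc ++ l).Nodup) :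
    List.foldl PySem.Set.add acc l = acc ++ l := by
  induction l generalizing acc with
  | nil => simp
  | cons x t ih =>
    have hx : ¬ x ∈ acc := by
      intro hm
      have := List.disjoint_of_nodup_append h
      exact this hm (by simp)
    have hadd : PySem.Set.add acc x = acc ++ [x] := by
      simp [PySem.Set.add, PySem.Set.contains, hx]
    simp only [List.foldl_cons, hadd]
    rw [ih (by simpa using h)]
    simp

theorem pv_ofList_nodup {l : List Int} (h : l.Nodup) : PySem.Set.ofList l = l := by
  rw [PySem.Set.ofList_eq_foldl, pv_foldl_add_nodup (by simpa using h)]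
  simp

theorem pv_foldl_add_filter (q : Int → Bool) (l : List Int) : ∀ acc : List Int,
    (List.foldl PySem.Set.add acc l).filter q = List.foldl PySem.Set.add (acc.filter q) (l.filter q) := by
  induction l with
  | nil => intro acc; simp
  | cons x t ih =>
    intro acc
    by_cases hq : q x
    · have : (List.filter q (x :: t)) = x :: t.filter q := by simp [hq]
      rw [this]
      simp only [List.foldl_cons]
      rw [ih]
      congr 1
      by_cases hm : x ∈ acc
      · simp [PySem.Set.add, PySem.Set.contains, hm, hq, List.mem_filter]
      · simp [PySem.Set.add, PySem.Set.contains, hm, hq, List.mem_filter, List.filter_append]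
    · have : (List.filter q (x :: t)) = t.filter q := by simp [hq]
      rw [this]
      simp only [List.foldl_cons]
      rw [ih]
      congr 1
      by_cases hm : x ∈ acc
      · simp [PySem.Set.add, PySem.Set.contains, hm]
      · simp [PySem.Set.add, PySem.Set.contains, hm, List.filter_append, hq]
    
theorem pv_ofList_filter (q : Int → Bool) (l : List Int) :
    PySem.Set.ofList (l.filter q) = (PySem.Set.ofList l).filter q := by
  rw [PySem.Set.ofList_eq_foldl, PySem.Set.ofList_eq_foldl, pv_foldl_add_filter]
  simp

theorem pv_count_flatMap3 (S : List Int) (v : Int) :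
    (S.flatMap (fun u => [u, u, u])).count v = 3 * S.count v := by
  induction S with
  | nil => simp
  | cons x t ih =>
    simp only [List.flatMap_cons, List.count_append, ih, List.count_cons]
    by_cases h : x = v <;> simp [List.count_cons, h] <;> ring

theorem pv_pairwise_le_flatMap3 {S : List Int} (h : S.Pairwise (· < ·)) :
    (S.flatMap (fun u => [u, u, u])).Pairwise (· ≤ ·) := by
  induction S with
  | nil => simp
  | cons x t ih =>
    rcases List.pairwise_cons.mp h with ⟨hx, ht⟩
    simp only [List.flatMap_cons]
    have htail := ih ht
    have hmem : ∀ y ∈ t.flatMap (fun u => [u, u, u]), x ≤ y := by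
      intro y hy
      rcases List.mem_flatMap.mp hy with ⟨u, hu, hyu⟩
      have : y = u := by simpa using hyu
      exact le_of_lt (this ▸ hx u hu)
    refine List.pairwise_append.mpr ⟨?_, htail, ?_⟩
    · simp
    · intro a ha b hb
      have : a = x := by simpa using ha
      exact this ▸ hmem b hb

theorem pv_getD_flatMap3 (S : List Int) (k r : Nat) (hk : k < S.length) (hr : r < 3) :
    (S.flatMap (fun u => [u, u, u])).getD (3 * k + r) 0 = S.getD k 0 := by
  induction S generalizing k with
  | nil => simp at hk
  | cons x t ih =>
    cases k with
    | zero =>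
      interval_cases r <;> simp [List.flatMap_cons]
    | succ k =>
      have h3 : 3 * (k + 1) + r = (3 * k + r) + 1 + 1 + 1 := by ring
      simp only [List.flatMap_cons, List.cons_append, h3, List.getD_cons_succ]
      exact ih k (by simpa using hk)

theorem pv_map_getD_range (S : List Int) :
    (List.range S.length).map (fun k => S.getD k 0) = S := by
  induction S with
  | nil => simp
  | cons x t ih =>
    simp only [List.length_cons, List.range_succ_eq_map, List.map_cons, List.map_map]
    refine congrArg (x :: ·) ?_
    have : ((fun k => (x :: t).getD k 0) ∘ Nat.succ) = (fun k => t.getD k 0) := by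
      funext k; simp
    rw [this, ih]

theorem pv_length_flatMap3 (S : List Int) : (S.flatMap fun u => [u, u, u]).length = 3 * S.length := by
  induction S with
  | nil => simp
  | cons x t ih => simp [ih]; ring

theorem pv_pyRange3 (m : Nat) :
    PySem.List.pyRange 0 (3 * (m : Int) - 2) 3 = (List.range m).map (fun k : Nat => (0:Int) + 3 * (k : Int)) := by
  rw [PySem.List.pyRange_of_pos 0 (3 * (m : Int) - 2) (by norm_num)]
  have hcnt : (if (0:Int) < 3 * (m : Int) - 2 then ((3 * (m : Int) - 2 - 0 + 3 - 1) / 3).toNat else 0) = m := by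
    cases m with
    | zero => norm_num
    | succ m =>
      rw [if_pos (by push_cast; omega)]
      have : (3 * ((m:Int) + 1) - 2 - 0 + 3 - 1) = 3 * ((m:Int) + 1) := by ring
      push_cast
      omega
  rw [hcnt]

theorem pv_tripleloop (S : List Int) :
    ((PySem.List.pyRange 0 (((S.flatMap fun u => [u, u, u]).length : Int) - 2) 3).all (fun i =>
      !((!(PySem.List.pyGetD (S.flatMap fun u => [u, u, u]) i 0 == PySem.List.pyGetD (S.flatMap fun u => [u, u, u]) (i + 1) 0))
        || (!(PySem.List.pyGetD (S.flatMap fun u => [u, u, u]) i 0 == PySem.List.pyGetD (S.flatMap fun u => [u, u, u]) (i + 2) 0))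
        || (!(PySem.List.pyGetD (S.flatMap fun u => [u, u, u]) (i + 1) 0 == PySem.List.pyGetD (S.flatMap fun u => [u, u, u]) (i + 2) 0))))) = true := by
  rw [pv_length_flatMap3]
  have h3 : (((3 * S.length : Nat) : Int) - 2) = 3 * (S.length : Int) - 2 := by push_cast; ring
  rw [h3, pv_pyRange3]
  rw [List.all_map, List.all_eq_true]
  intro k hk
  have hk' : k < S.length := List.mem_range.mp hk
  have e0 : (0 : Int) + 3 * (k : Int) = ((3 * k + 0 : Nat) : Int) := by push_cast; ring
  have e1 : (0 : Int) + 3 * (k : Int) + 1 = ((3 * k + 1 : Nat) : Int) := by push_cast; ring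
  have e2 : (0 : Int) + 3 * (k : Int) + 2 = ((3 * k + 2 : Nat) : Int) := by push_cast; ring
  simp only [Function.comp_apply]
  rw [e1, e2, e0]
  simp only [PySem.List.pyGetD_natCast]
  rw [pv_getD_flatMap3 S k 0 hk' (by norm_num), pv_getD_flatMap3 S k 1 hk' (by norm_num),
      pv_getD_flatMap3 S k 2 hk' (by norm_num)]
  simp

theorem pv_slice3 (S : List Int) :
    PySem.List.slice? (S.flatMap fun u => [u, u, u]) none none 3 = some S := by
  rw [PySem.List.slice?]
  rw [if_neg (by norm_num)]
  simp only [PySem.List.sliceIndices]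
  norm_num
  have hcnt : (if 0 < S.length then ((((S.length):Int) * 3 + 3 - 1) / 3).toNat else 0) = S.length := by
    split <;> omega
  rw [hcnt]
  have hstep : ∀ k ∈ List.range S.length,
      (S.flatMap fun u => [u, u, u])[((3:Int) * (k:Int)).toNat]? = some (S.getD k 0) := by
    intro k hk
    have hk' : k < S.length := List.mem_range.mp hk
    have ht : ((3:Int) * (k:Int)).toNat = 3 * k := by omega
    rw [ht]
    have hlt : 3 * k < (S.flatMap fun u => [u, u, u]).length := by rw [pv_length_flatMap3]; omega
    rw [List.getElem?_eq_getElem hlt, ← List.getD_eq_getElem _ 0 hlt]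
    have h0 := pv_getD_flatMap3 S k 0 hk' (by norm_num)
    simpa using h0
  rw [List.filterMap_congr hstep]
  have hsm : (fun k => some (S.getD k 0)) = (some ∘ fun k => S.getD k 0) := rfl
  rw [hsm, List.filterMap_eq_map, pv_map_getD_range]

theorem pv_chainAll_iff (S : List Int) :
    ((PySem.List.pyRange 0 ((S.length : Int) - 1) 1).all
      (fun i => PySem.List.pyGetD S i 0 + 1 == PySem.List.pyGetD S (i + 1) 0) = true)
    ↔ List.IsChain (fun a b => a + 1 = b) S := by
  rw [PySem.List.pyRange_one, List.all_map, List.all_eq_true, List.isChain_iff_getElem]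
  have hton : ((S.length : Int) - 1 - 0).toNat = S.length - 1 := by omega
  rw [hton]
  constructor
  · intro h k hk
    have hh := h k (List.mem_range.mpr (by omega))
    have e0 : (0:Int) + (k:Int) = ((k:Nat):Int) := by push_cast; ring
    have e1 : (0:Int) + (k:Int) + 1 = (((k+1):Nat):Int) := by push_cast; ring
    have e1' : ((k:Int)) + 1 = (((k+1):Nat):Int) := by push_cast; ring
    simp only [Function.comp_apply, e1, e0, e1', PySem.List.pyGetD_natCast] at hh
    rw [List.getD_eq_getElem _ 0 (by omega), List.getD_eq_getElem _ 0 hk] at hh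
    exact beq_iff_eq.mp hh
  · intro h k hk
    have hk' : k + 1 < S.length := by have := List.mem_range.mp hk; omega
    have hh := h k hk'
    have e0 : (0:Int) + (k:Int) = ((k:Nat):Int) := by push_cast; ring
    have e1 : (0:Int) + (k:Int) + 1 = (((k+1):Nat):Int) := by push_cast; ring
    have e1' : ((k:Int)) + 1 = (((k+1):Nat):Int) := by push_cast; ring
    simp only [Function.comp_apply, e1, e0, e1', PySem.List.pyGetD_natCast]
    rw [List.getD_eq_getElem _ 0 (by omega), List.getD_eq_getElem _ 0 hk']
    exact beq_iff_eq.mpr hh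

theorem pv_le_getLast {l : List Int} (h : l.Pairwise (· ≤ ·)) (hne : l ≠ []) :
    ∀ y ∈ l, y ≤ l.getLast hne := by
  induction l with
  | nil => simp at hne
  | cons x t ih =>
    intro y hy
    cases t with
    | nil => simp at hy; simp [hy, List.getLast]
    | cons b t' =>
      rw [List.getLast_cons (by simp)]
      rcases List.mem_cons.mp hy with rfl | hy'
      · exact le_trans (List.rel_of_pairwise_cons h (List.getLast_mem _)) le_rfl
      · exact ih h.of_cons (by simp) y hy'

theorem pv_gap {b : Int} {t : List Int} (h : (b :: t).Pairwise (· < ·)) :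
    (t.length : Int) ≤ (b :: t).getLast (by simp) - b := by
  induction t generalizing b with
  | nil => simp [List.getLast]
  | cons c t' ih =>
    rw [List.getLast_cons (by simp)]
    have hbc : b < c := List.rel_of_pairwise_cons h (by simp)
    have hih := ih h.of_cons
    simp only [List.length_cons]
    push_cast at hih ⊢
    omega

theorem pv_chain_iff_last (x : Int) (S : List Int) (h : (x :: S).Pairwise (· < ·)) :
    List.IsChain (fun a b => a + 1 = b) (x :: S) ↔
      (x :: S).getLast (by simp) - x = (S.length : Int) := by
  induction S generalizing x with
  | nil => simp [List.getLast]
  | cons b t ih =>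
    rw [List.isChain_cons_cons, List.getLast_cons (by simp)]
    have hxb : x < b := List.rel_of_pairwise_cons h (by simp)
    have hgap := pv_gap h.of_cons
    have hih := ih b h.of_cons
    simp only [List.length_cons]
    push_cast
    constructor
    · rintro ⟨hab, hch⟩
      have := hih.mp hch
      omega
    · intro hlast
      have h1 : x + 1 = b := by omega
      exact ⟨h1, hih.mpr (by omega)⟩


theorem pv_if_true_false (b : Bool) : (if b = true then true else false) = b := by
  cases b <;> simp

theorem pv_foldl_partition (p : Int → Bool) (l : List Int) : ∀ acc1 acc2 : List Int,
    l.foldl (fun acc each => if p each then (acc.1 ++ [each], acc.2) else (acc.1, acc.2 ++ [each])) (acc1, acc2)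
      = (acc1 ++ l.filter p, acc2 ++ l.filter (fun v => !p v)) := by
  induction l with
  | nil => intro acc1 acc2; simp
  | cons x t ih =>
    intro acc1 acc2
    by_cases hp : p x <;> simp [hp, ih, List.filter_cons]

theorem pv_is_aircraft_eq (S l : List Int)
    (hs : PySem.List.sorted l (fun x => x) = S.flatMap fun u => [u, u, u]) :
    is_aircraft l = is_continue S := by
  simp only [is_aircraft]
  rw [hs]
  have hl : (l.length : Int) = (((S.flatMap fun u => [u, u, u]).length : Nat) : Int) := by
    rw [← hs, PySem.List.length_sorted]
  rw [hl, if_pos (pv_tripleloop S), pv_slice3]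
  rfl

theorem b_eq_answer (cards : List Int) : is_aircraft_wing_alt cards = pvAnswer cards := by
  simp only [is_aircraft_wing_alt, pvAnswer]
  rw [PySem.Dict.foldl_insert_getD_add_one_eq_counter, PySem.Dict.items_counter,
      List.filter_map]
  have hp : ((fun (p : Int × Int) => p.2 == 3) ∘ (fun k => (k, (List.count k cards : Int))))
      = (fun v => PySem.List.count cards v == 3) := by
    funext v
    show (((List.count v cards : Nat) : Int) == 3) = _
    rw [PySem.List.count_eq]
    by_cases h : List.count v cards = 3 <;> simp [h] <;> omega
  rw [hp]
  simp only [List.map_map, List.length_map]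
  have hmfst : ((fun (p : Int × Int) => p.1) ∘ (fun k => (k, (List.count k cards : Int)))) = id := by
    funext k; rfl
  rw [hmfst, List.map_id]

theorem a_eq_answer (cards : List Int) : is_aircraft_wing cards = pvAnswer cards := by
  simp only [is_aircraft_wing, pvAnswer]
  rw [pv_foldl_partition (fun v => PySem.List.count cards v == 3) cards [] []]
  simp only [List.nil_append]
  refine Eq.trans (pv_if_true_false _) ?_
  set P : Int → Bool := fun v => PySem.List.count cards v == 3 with hPdef
  set D : List Int := PySem.Set.ofList cards with hD
  set T : List Int := D.filter P with hT
  set S : List Int := PySem.List.sorted T (fun x => x) with hS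
  have hP : ∀ v : Int, P v = true ↔ List.count v cards = 3 := by
    intro v
    show (PySem.List.count cards v == 3) = true ↔ _
    rw [PySem.List.count_eq]; exact beq_iff_eq
  have hndD : D.Nodup := PySem.Set.nodup_ofList cards
  have hndT : T.Nodup := hndD.filter _
  have hpermS : S.Perm T := PySem.List.sorted_perm T _ false
  have hndS : S.Nodup := (hpermS.nodup_iff).mpr hndT
  have hpairS : S.Pairwise (· < ·) := by
    have h1 : S.Pairwise (· ≤ ·) := PySem.List.sorted_pairwise T _
    have h2 : S.Pairwise (· ≠ ·) := List.Pairwise.imp (fun h => h) hndS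
    exact (h1.and h2).imp (fun ⟨hle, hne⟩ => lt_of_le_of_ne hle hne)
  have hmemT : ∀ v : Int, v ∈ T ↔ (v ∈ cards ∧ P v = true) := by
    intro v
    rw [hT, List.mem_filter, hD, PySem.Set.mem_ofList]
  have hmemS : ∀ v : Int, v ∈ S ↔ v ∈ T := fun v => hpermS.mem_iff
  have hperm : (S.flatMap fun u => [u, u, u]).Perm (cards.filter P) := by
    rw [List.perm_iff_count]
    intro v
    rw [pv_count_flatMap3, hpermS.count_eq v]
    by_cases hPv : P v = true
    · have hcnt : List.count v cards = 3 := (hP v).mp hPv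
      have hvc : v ∈ cards := List.count_pos_iff.mp (by omega)
      have hvT : v ∈ T := (hmemT v).mpr ⟨hvc, hPv⟩
      rw [List.count_eq_one_of_mem hndT hvT, List.count_filter hPv, hcnt]
    · have h1 : List.count v T = 0 := List.count_eq_zero.mpr (fun hm => hPv ((hmemT v).mp hm).2)
      have h2 : List.count v (cards.filter P) = 0 :=
        List.count_eq_zero.mpr (fun hm => hPv (List.of_mem_filter hm))
      rw [h1, h2]
  have hsorted : PySem.List.sorted (cards.filter P) (fun x => x) = S.flatMap fun u => [u, u, u] :=
    PySem.List.sorted_id_eq_of_perm_of_pairwise _ _ hperm (pv_pairwise_le_flatMap3 hpairS)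
  have hlen1 : (cards.filter P).length = 3 * S.length := by
    rw [← hperm.length_eq, pv_length_flatMap3]
  have hlenTS : S.length = T.length := hpermS.length_eq
  have hQ : (fun v => !(PySem.List.count cards v == 3)) = (fun v => !P v) := rfl
  have hsum : T.length + (D.filter (fun v => !P v)).length = D.length :=
    (List.length_eq_length_filter_add P).symm
  rw [pv_is_aircraft_eq S (cards.filter P) hsorted]
  rw [show PySem.Set.ofList (cards.filter (fun v => !(PySem.List.count cards v == 3)))
        = D.filter (fun v => !P v) from by rw [hQ, hD, pv_ofList_filter]]
  rw [hlen1, hlenTS]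
  by_cases hc : (T.length : Int) = (D.length : Int) - (T.length : Int)
  · have hcb : ((T.length : Int) == (D.length : Int) - (T.length : Int)) = true := beq_iff_eq.mpr hc
    simp only [hcb]
    rw [if_neg (by decide)]
    have hW : ((D.filter (fun v => !P v)).length : Int) = (T.length : Int) := by
      have := hsum; omega
    have hWb : (((3 * T.length : Nat) : Int) == 3 * ((D.filter (fun v => !P v)).length : Int)) = true := by
      rw [hW]; push_cast; simp
    rw [hWb, Bool.and_true]
    by_cases hTnil : T = []
    · have hSnil : S = [] := by
        rw [hS, hTnil]
        rfl
      simp only [hSnil, hTnil]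
      decide
    · rw [if_neg (by simp [List.isEmpty_iff, hTnil])]
      have hSne : S ≠ [] := by
        intro hn
        exact hTnil ((PySem.List.sorted_eq_nil_iff T _ false).mp (hS ▸ hn))
      have hn13 : ¬ (13 : Int) ∈ S ↔ ¬ (13 : Int) ∈ T := not_iff_not.mpr (hmemS 13)
      have hn14 : ¬ (14 : Int) ∈ S ↔ ¬ (14 : Int) ∈ T := not_iff_not.mpr (hmemS 14)
      have hn15 : ¬ (15 : Int) ∈ S ↔ ¬ (15 : Int) ∈ T := not_iff_not.mpr (hmemS 15)
      simp only [is_continue, pv_ofList_nodup hndS, beq_self_eq_true, Bool.not_true, Bool.or_false]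
      by_cases hmem : (13 : Int) ∈ T ∨ (14 : Int) ∈ T ∨ (15 : Int) ∈ T
      · have hcontT : (S.contains 13 || S.contains 14 || S.contains 15) = true := by
          simp only [Bool.or_eq_true, List.contains_iff_mem]
          rcases hmem with h | h | h
          · have := (hmemS 13).mpr h; tauto
          · have := (hmemS 14).mpr h; tauto
          · have := (hmemS 15).mpr h; tauto
        have hanyT : (T.any fun v => v == 13 || v == 14 || v == 15) = true := by
          rcases hmem with h | h | h
          · exact List.any_eq_true.mpr ⟨13, h, by decide⟩
          · exact List.any_eq_true.mpr ⟨14, h, by decide⟩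
          · exact List.any_eq_true.mpr ⟨15, h, by decide⟩
        rw [if_pos hcontT, if_pos hanyT]
      · push_neg at hmem
        obtain ⟨hm13, hm14, hm15⟩ := hmem
        have hcontF : ¬ ((S.contains 13 || S.contains 14 || S.contains 15) = true) := by
          simp only [Bool.or_eq_true, List.contains_iff_mem]
          intro hcon
          have n13 : ¬ (13 : Int) ∈ S := hn13.mpr hm13
          have n14 : ¬ (14 : Int) ∈ S := hn14.mpr hm14
          have n15 : ¬ (15 : Int) ∈ S := hn15.mpr hm15
          tauto
        have hanyF : ¬ ((T.any fun v => v == 13 || v == 14 || v == 15) = true) := by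
          intro hcon
          rcases List.any_eq_true.mp hcon with ⟨v, hv, hv3⟩
          have : v = 13 ∨ v = 14 ∨ v = 15 := by
            simp only [Bool.or_eq_true, beq_iff_eq] at hv3
            tauto
          rcases this with rfl | rfl | rfl
          · exact hm13 hv
          · exact hm14 hv
          · exact hm15 hv
        rw [if_neg hcontF, if_neg hanyF]
        obtain ⟨x, S', hxS⟩ := List.exists_cons_of_ne_nil hSne
        cases hmx : PySem.List.max? T (fun x => x) with
        | none => exact absurd ((PySem.List.max?_eq_none_iff T _).mp hmx) hTnil
        | some mx =>
          cases hmn : PySem.List.min? T (fun x => x) with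
          | none => exact absurd ((PySem.List.min?_eq_none_iff T _).mp hmn) hTnil
          | some mn =>
            have hpairS' : (x :: S').Pairwise (· < ·) := by rw [← hxS]; exact hpairS
            have hmxS : mx ∈ S := (hmemS mx).mpr (PySem.List.max?_mem hmx)
            have hmnS : mn ∈ S := (hmemS mn).mpr (PySem.List.min?_mem hmn)
            have hmxS' : mx ∈ x :: S' := by rw [← hxS]; exact hmxS
            have hmnS' : mn ∈ x :: S' := by rw [← hxS]; exact hmnS
            have hlastS : (x :: S').getLast (by simp) ∈ S := by
              rw [hxS]; exact List.getLast_mem _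
            have hlast : mx = (x :: S').getLast (by simp) := by
              have h1 : mx ≤ (x :: S').getLast (by simp) :=
                pv_le_getLast (hpairS'.imp le_of_lt) (by simp) mx hmxS'
              have h2 : (x :: S').getLast (by simp) ≤ mx :=
                PySem.List.max?_isMax hmx _ ((hmemS _).mp hlastS)
              exact le_antisymm h1 h2
            have hhead : mn = x := by
              have hxT : x ∈ T := (hmemS x).mp (by rw [hxS]; exact List.mem_cons_self)
              have h1 : mn ≤ x := PySem.List.min?_isMin hmn x hxT
              have h2 : x ≤ mn := by
                rcases List.mem_cons.mp hmnS' with rfl | hmn'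
                · exact le_rfl
                · exact le_of_lt (List.rel_of_pairwise_cons hpairS' hmn')
              exact le_antisymm h1 h2
            rw [Bool.eq_iff_iff]
            rw [hxS, pv_chainAll_iff, pv_chain_iff_last x S' hpairS']
            rw [beq_iff_eq, hlast, hhead]
            have hTS' : (T.length : Int) - 1 = (S'.length : Int) := by
              have hlenS : S.length = S'.length + 1 := by rw [hxS]; rfl
              rw [← hlenTS, hlenS]; push_cast; ring
            rw [hTS']
  · have hcb : ((T.length : Int) == (D.length : Int) - (T.length : Int)) = false := beq_eq_false_iff_ne.mpr hc
    simp only [hcb]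
    rw [if_pos (by decide)]
    have hW : ¬ ((3 * T.length : Nat) : Int) = 3 * ((D.filter (fun v => !P v)).length : Int) := by
      have := hsum
      intro hcon
      push_cast at hcon
      omega
    have hWb : (((3 * T.length : Nat) : Int) == 3 * ((D.filter (fun v => !P v)).length : Int)) = false := by
      rw [beq_eq_false_iff_ne]; exact hW
    rw [hWb, Bool.and_false]

-- ===== VERDICT (by name: the statement is the Claim_ definition above) =====
theorem is_aircraft_wing_spec : Claim_equal_is_aircraft_wing := by
  intro cards _
  unfold Spec_is_aircraft_wing
  rw [a_eq_answer, b_eq_answer]
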